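-- pv_equiv track=rewrite | github.com/Roboy/raveskills | modules/luigi/__init__.py | get_complete_order_and_cost
-- ===== SOURCE A (Python) =====
-- cost_per_scoop = 1  # TODO move to external config file that also lists the available flavors and payment options
--
-- def fix_pronunciation(flavor):
--     if flavor == "vanilla" or flavor == "vanillas":
--         return "vanillla"
--     if flavor == "chocolate" or flavor == "chocolates" or flavor == "choco":
--         return "choclate"
--     if flavor == "strawberry" or flavor == "strawberries":
--         return "strawbaary"
--
-- def get_complete_order_and_cost(flavor_scoop_tuple_list):
--     order = ""
--     cost = 0
--     if len(flavor_scoop_tuple_list) == 1: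
--         if flavor_scoop_tuple_list[0][1] == 1:
--             order += "{scoops} scoop of {flavor}".format(flavor=fix_pronunciation(flavor_scoop_tuple_list[0][0]),
--                                                          scoops=flavor_scoop_tuple_list[0][1])
--         else:
--             order += "{scoops} scoops of {flavor}".format(flavor=fix_pronunciation(flavor_scoop_tuple_list[0][0]),
--                                                           scoops=flavor_scoop_tuple_list[0][1])
--         cost = cost_per_scoop * flavor_scoop_tuple_list[0][1]
--     else:
--         order_length = len(flavor_scoop_tuple_list)
--         for i in range(0, order_length - 1):
--             if flavor_scoop_tuple_list[i][1] == 1: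
--                 order += "{scoops} scoop of {flavor}, ".format(flavor=fix_pronunciation(flavor_scoop_tuple_list[i][0]),
--                                                                scoops=flavor_scoop_tuple_list[i][1])
--             else:
--                 order += "{scoops} scoops of {flavor}, ".format(flavor=fix_pronunciation(flavor_scoop_tuple_list[i][0]),
--                                                                 scoops=flavor_scoop_tuple_list[i][1])
--             cost += cost_per_scoop * flavor_scoop_tuple_list[i][1]
--         order = order[:len(order) - 2]
--         if flavor_scoop_tuple_list[order_length - 1][1] == 1:
--             order += " and {scoops} scoop of {flavor}" \
--                 .format(flavor=fix_pronunciation(flavor_scoop_tuple_list[order_length - 1][0]),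
--                         scoops=flavor_scoop_tuple_list[order_length - 1][1])
--         else:
--             order += " and {scoops} scoops of {flavor}" \
--                 .format(flavor=fix_pronunciation(flavor_scoop_tuple_list[order_length - 1][0]),
--                         scoops=flavor_scoop_tuple_list[order_length - 1][1])
--         cost += cost_per_scoop * flavor_scoop_tuple_list[order_length - 1][1]
--     return order, cost
-- ===== SOURCE B (Python) =====
-- cost_per_scoop = 1
--
-- def fix_pronunciation(flavor):
--     if flavor == "vanilla" or flavor == "vanillas":
--         return "vanillla"
--     if flavor == "chocolate" or flavor == "chocolates" or flavor == "choco":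
--         return "choclate"
--     if flavor == "strawberry" or flavor == "strawberries":
--         return "strawbaary"
--
-- def get_complete_order_and_cost(flavor_scoop_tuple_list):
--     flavor, scoops = flavor_scoop_tuple_list[0]
--     rest = flavor_scoop_tuple_list[1:]
--     piece = "{} scoop{} of {}".format(scoops, "" if scoops == 1 else "s",
--                                       fix_pronunciation(flavor))
--     cost = cost_per_scoop * scoops
--     if not rest:
--         return piece, cost
--     sep = " and " if len(rest) == 1 else ", "
--     tail_order, tail_cost = get_complete_order_and_cost(rest)
--     return piece + sep + tail_order, cost + tail_cost
-- ===== Notes on version B (the rewrite author's own statement) =====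
-- stated objective: simpler
-- what changed: Replaces A's iterative string accumulation with a trailing-slice fixup and duplicated singular/plural branches by a direct structural recursion on the list: each call formats its head piece and picks the separator (' and ' before the last item, ', ' otherwise) from the length of the remaining tail, so no slicing or post-correction is needed.
import Mathlib
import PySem

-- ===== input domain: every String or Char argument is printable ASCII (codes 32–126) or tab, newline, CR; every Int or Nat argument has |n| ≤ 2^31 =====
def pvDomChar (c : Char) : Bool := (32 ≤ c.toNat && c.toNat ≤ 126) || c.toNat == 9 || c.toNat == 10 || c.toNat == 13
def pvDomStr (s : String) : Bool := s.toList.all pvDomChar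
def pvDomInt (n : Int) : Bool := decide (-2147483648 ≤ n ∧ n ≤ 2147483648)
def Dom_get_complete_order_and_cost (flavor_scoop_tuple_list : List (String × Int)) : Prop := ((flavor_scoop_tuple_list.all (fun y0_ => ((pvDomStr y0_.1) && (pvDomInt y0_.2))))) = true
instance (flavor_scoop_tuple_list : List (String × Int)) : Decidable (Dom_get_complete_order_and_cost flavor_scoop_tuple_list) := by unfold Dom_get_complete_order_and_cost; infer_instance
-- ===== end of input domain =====

-- B replaces A's iterative accumulation with trailing-slice fixup by a structural recursion
-- that picks the separator from the length of the remaining tail (objective: simpler).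

-- ===== PORT A =====
def cost_per_scoop : Int := 1

-- Python's fix_pronunciation returns Optional[str] (None on the fall-through)
def fix_pronunciation (flavor : String) : Option String :=
  if flavor = "vanilla" ∨ flavor = "vanillas" then some "vanillla"
  else if flavor = "chocolate" ∨ flavor = "chocolates" ∨ flavor = "choco" then some "choclate"
  else if flavor = "strawberry" ∨ flavor = "strawberries" then some "strawbaary"
  else none

-- str.format's rendering of an Optional[str] value: None prints as "None" (exact)
def pyFmtOpt (o : Option String) : List Char :=
  match o with
  | some s => s.toList
  | none => "None".toList

def get_complete_order_and_cost (flavor_scoop_tuple_list : List (String × Int)) : String × Int :=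
  let order : List Char := []
  let cost : Int := 0
  if flavor_scoop_tuple_list.length == 1 then
    let t := PySem.List.pyGetD flavor_scoop_tuple_list 0 ("", 0)
    let order := order ++
      (if t.2 == 1 then
        PySem.Int.toChars t.2 ++ " scoop of ".toList ++ pyFmtOpt (fix_pronunciation t.1)
      else
        PySem.Int.toChars t.2 ++ " scoops of ".toList ++ pyFmtOpt (fix_pronunciation t.1))
    let cost := cost_per_scoop * t.2
    (String.mk order, cost)
  else
    let order_length : Int := flavor_scoop_tuple_list.length
    let st := (PySem.List.pyRange 0 (order_length - 1)).foldl
      (fun (s : List Char × Int) i =>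
        let t := PySem.List.pyGetD flavor_scoop_tuple_list i ("", 0)
        (s.1 ++
          (if t.2 == 1 then
            PySem.Int.toChars t.2 ++ " scoop of ".toList ++ pyFmtOpt (fix_pronunciation t.1) ++ ", ".toList
          else
            PySem.Int.toChars t.2 ++ " scoops of ".toList ++ pyFmtOpt (fix_pronunciation t.1) ++ ", ".toList),
         s.2 + cost_per_scoop * t.2))
      (order, cost)
    let order := PySem.List.slice st.1 none (some ((st.1.length : Int) - 2))
    let t := PySem.List.pyGetD flavor_scoop_tuple_list (order_length - 1) ("", 0)
    let order := order ++
      (if t.2 == 1 then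
        " and ".toList ++ PySem.Int.toChars t.2 ++ " scoop of ".toList ++ pyFmtOpt (fix_pronunciation t.1)
      else
        " and ".toList ++ PySem.Int.toChars t.2 ++ " scoops of ".toList ++ pyFmtOpt (fix_pronunciation t.1))
    let cost := st.2 + cost_per_scoop * t.2
    (String.mk order, cost)

-- ===== PORT B =====
-- "{} scoop{} of {}".format(scoops, "" if scoops == 1 else "s", fix_pronunciation(flavor))
def bPiece (t : String × Int) : List Char :=
  PySem.Int.toChars t.2 ++ " scoop".toList ++ (if t.2 == 1 then "".toList else "s".toList)
    ++ " of ".toList ++ pyFmtOpt (fix_pronunciation t.1)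

-- the recursive body of Source B: head t, remaining tail rest (strings carried as List Char, exact)
def bRec (t : String × Int) (rest : List (String × Int)) : List Char × Int :=
  match rest with
  | [] => (bPiece t, cost_per_scoop * t.2)
  | u :: rs =>
    let sep := if rs.isEmpty then " and ".toList else ", ".toList
    let tail := bRec u rs
    (bPiece t ++ sep ++ tail.1, cost_per_scoop * t.2 + tail.2)

def get_complete_order_and_cost_alt (flavor_scoop_tuple_list : List (String × Int)) : String × Int :=
  match flavor_scoop_tuple_list with
  | [] => ("", 0)  -- Python raises IndexError (xs[0]) here; excluded by Pre_
  | t :: rest => (String.mk (bRec t rest).1, (bRec t rest).2)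

-- ===== PRECONDITION & SPEC =====
-- Pre_ excludes only the empty list, on which Python A raises IndexError; B raises there too.
def Pre_get_complete_order_and_cost (flavor_scoop_tuple_list : List (String × Int)) : Prop :=
  flavor_scoop_tuple_list ≠ []
instance (flavor_scoop_tuple_list : List (String × Int)) : Decidable (Pre_get_complete_order_and_cost flavor_scoop_tuple_list) := by unfold Pre_get_complete_order_and_cost; infer_instance

def pvWitness_get_complete_order_and_cost : (List (String × Int)) := [("vanilla", 2), ("mint", 1)]

def Spec_get_complete_order_and_cost (flavor_scoop_tuple_list : List (String × Int)) (out : String × Int) : Prop := out = get_complete_order_and_cost_alt flavor_scoop_tuple_list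
instance (flavor_scoop_tuple_list : List (String × Int)) (out : String × Int) : Decidable (Spec_get_complete_order_and_cost flavor_scoop_tuple_list out) := by unfold Spec_get_complete_order_and_cost; infer_instance

-- ===== CLAIM (what is proved, stated in full; the proofs are below) =====
def Claim_equal_get_complete_order_and_cost : Prop := ∀ (flavor_scoop_tuple_list : List (String × Int)), Dom_get_complete_order_and_cost flavor_scoop_tuple_list → Pre_get_complete_order_and_cost flavor_scoop_tuple_list → Spec_get_complete_order_and_cost flavor_scoop_tuple_list (get_complete_order_and_cost flavor_scoop_tuple_list)

-- ===== LEMMAS AND PROOFS =====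

-- literal splittings of the format strings (closed facts)
theorem lit_scoop : " scoop of ".toList = " scoop".toList ++ " of ".toList := by decide

theorem lit_scoops : " scoops of ".toList = " scoop".toList ++ ("s".toList ++ " of ".toList) := by decide

theorem pieceC_eq (t : String × Int) :
    (if t.2 == 1 then
      PySem.Int.toChars t.2 ++ " scoop of ".toList ++ pyFmtOpt (fix_pronunciation t.1) ++ ", ".toList
    else
      PySem.Int.toChars t.2 ++ " scoops of ".toList ++ pyFmtOpt (fix_pronunciation t.1) ++ ", ".toList)
    = bPiece t ++ ", ".toList := by
  by_cases h : t.2 = 1 <;> simp [bPiece, h, lit_scoop, lit_scoops, List.append_assoc]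

theorem pieceAnd_eq (t : String × Int) :
    (if t.2 == 1 then
      " and ".toList ++ PySem.Int.toChars t.2 ++ " scoop of ".toList ++ pyFmtOpt (fix_pronunciation t.1)
    else
      " and ".toList ++ PySem.Int.toChars t.2 ++ " scoops of ".toList ++ pyFmtOpt (fix_pronunciation t.1))
    = " and ".toList ++ bPiece t := by
  by_cases h : t.2 = 1 <;> simp [bPiece, h, lit_scoop, lit_scoops, List.append_assoc]

theorem flat_join (qs : List (List Char)) (h : qs ≠ []) :
    qs.flatMap (fun p => p ++ ", ".toList) = PySem.Chars.join ", ".toList qs ++ ", ".toList := by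
  induction qs with
  | nil => exact absurd rfl h
  | cons p qs ih =>
    cases qs with
    | nil => simp [PySem.Chars.join_singleton]
    | cons q rest =>
      rw [List.flatMap_cons, ih (by simp), PySem.Chars.join_cons_cons]
      simp [List.append_assoc]

theorem pyGetD_last {A : Type} (xs : List A) (d : A) (h : xs ≠ []) :
    PySem.List.pyGetD xs ((xs.length : Int) - 1) d = xs.getLast h := by
  have hl : 1 ≤ xs.length := by
    cases xs with
    | nil => exact absurd rfl h
    | cons a l => simp
  have h1 : (xs.length : Int) - 1 = ((xs.length - 1 : Nat) : Int) := by omega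
  rw [h1, PySem.List.pyGetD_natCast, List.getLast_eq_getElem,
    List.getD_eq_getElem _ _ (by omega)]

theorem map_pyGetD_range (xs : List (String × Int)) (hne : xs ≠ []) :
    (PySem.List.pyRange 0 ((xs.length : Int) - 1)).map
      (fun i => PySem.List.pyGetD xs i ("", 0)) = xs.dropLast := by
  have hl : 1 ≤ xs.length := by
    cases xs with
    | nil => exact absurd rfl hne
    | cons a l => simp
  have hld : xs.dropLast.length = xs.length - 1 := List.length_dropLast
  have h1 : (xs.length : Int) - 1 = ((xs.dropLast.length : Nat) : Int) := by
    rw [hld]; omega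
  rw [h1]
  have hmain := PySem.List.map_pyGetD_pyRange_zero xs.dropLast ("", 0)
  rw [PySem.List.len_eq] at hmain
  refine Eq.trans ?_ hmain
  apply List.map_congr_left
  intro j hj
  rw [PySem.List.mem_pyRange_one] at hj
  obtain ⟨h0, h2⟩ := hj
  have h2' : j.toNat < xs.dropLast.length := by omega
  have h2'' : j < (xs.length : Int) := by omega
  rw [PySem.List.pyGetD_eq_getElem _ _ h0 h2'',
      PySem.List.pyGetD_eq_getElem _ _ h0 (by omega)]
  exact (List.getElem_dropLast h2').symm

theorem A_else (xs : List (String × Int)) (hne : xs ≠ []) (h2 : 2 ≤ xs.length) :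
    get_complete_order_and_cost xs =
      (String.mk (PySem.Chars.join ", ".toList (xs.dropLast.map bPiece)
          ++ " and ".toList ++ bPiece (xs.getLast hne)),
       (xs.map (fun t => cost_per_scoop * t.2)).sum) := by
  have hne1 : (xs.length == 1) = false := by simp; omega
  have hdne : xs.dropLast ≠ [] := by
    intro hc
    have hld : xs.dropLast.length = xs.length - 1 := List.length_dropLast
    rw [hc] at hld
    simp at hld
    omega
  unfold get_complete_order_and_cost
  rw [hne1]
  simp only [Bool.false_eq_true, if_false, pieceC_eq, pieceAnd_eq]
  rw [PySem.List.foldl_prod_mk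
      (f := fun (s : List Char) (i : Int) =>
        s ++ (bPiece (PySem.List.pyGetD xs i ("", 0)) ++ ", ".toList))
      (g := fun (c : Int) (i : Int) =>
        c + cost_per_scoop * (PySem.List.pyGetD xs i ("", 0)).2)]
  rw [PySem.List.foldl_append_eq_flatMap
      (g := fun i => bPiece (PySem.List.pyGetD xs i ("", 0)) ++ ", ".toList)]
  rw [PySem.List.foldl_add (g := fun i => cost_per_scoop * (PySem.List.pyGetD xs i ("", 0)).2)]
  rw [List.nil_append]
  rw [← List.flatMap_map (fun i => PySem.List.pyGetD xs i ("", 0))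
        (fun t => bPiece t ++ ", ".toList) (PySem.List.pyRange 0 ((xs.length : Int) - 1)),
      map_pyGetD_range xs hne,
      ← List.flatMap_map bPiece (fun p => p ++ ", ".toList) xs.dropLast,
      flat_join (xs.dropLast.map bPiece)
        (by intro hc; have hlc := congrArg List.length hc; simp at hlc; omega)]
  have hcost : List.map (fun i => cost_per_scoop * (PySem.List.pyGetD xs i ("", 0)).2)
      (PySem.List.pyRange 0 ((xs.length : Int) - 1)) =
      xs.dropLast.map (fun t => cost_per_scoop * t.2) := by
    rw [← map_pyGetD_range xs hne, List.map_map]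
    rfl
  rw [hcost, pyGetD_last xs _ hne]
  dsimp only
  have hslice : PySem.List.slice
      (PySem.Chars.join ", ".toList (xs.dropLast.map bPiece) ++ ", ".toList) none
      (some ((((PySem.Chars.join ", ".toList (xs.dropLast.map bPiece) ++ ", ".toList).length : Nat) : Int) - 2)) =
      PySem.Chars.join ", ".toList (xs.dropLast.map bPiece) := by
    have hlen : ((((PySem.Chars.join ", ".toList (xs.dropLast.map bPiece) ++ ", ".toList).length : Nat) : Int) - 2) =
        (((PySem.Chars.join ", ".toList (xs.dropLast.map bPiece)).length : Nat) : Int) := by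
      simp [List.length_append]
    rw [hlen, PySem.List.slice_to _ (by positivity)]
    simp
  rw [hslice]
  refine Prod.ext ?_ ?_
  · exact congrArg String.mk (by simp [List.append_assoc])
  · obtain ⟨ys, y, rfl⟩ : ∃ ys y, xs = ys ++ [y] :=
      ⟨xs.dropLast, xs.getLast hne, (List.dropLast_append_getLast hne).symm⟩
    simp [cost_per_scoop, List.sum_append]

-- characterisation of B's recursion on a nonempty tail
theorem bRec_eq (rest : List (String × Int)) (t : String × Int) (h : rest ≠ []) :
    bRec t rest =
      (PySem.Chars.join ", ".toList ((t :: rest).dropLast.map bPiece)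
          ++ " and ".toList ++ bPiece ((t :: rest).getLast (by simp)),
       ((t :: rest).map (fun u => cost_per_scoop * u.2)).sum) := by
  induction rest generalizing t with
  | nil => exact absurd rfl h
  | cons u rs ih =>
    cases rs with
    | nil =>
      simp [bRec, PySem.Chars.join_singleton, List.append_assoc]
    | cons v ws =>
      have hrec := ih u (by simp)
      have hstep : bRec t (u :: v :: ws) =
          (bPiece t ++ ", ".toList ++ (bRec u (v :: ws)).1,
           cost_per_scoop * t.2 + (bRec u (v :: ws)).2) := rfl
      rw [hstep, hrec]
      have hne2 : ((u :: v :: ws).dropLast.map bPiece) ≠ [] := by simp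
      obtain ⟨p, ps, hps⟩ := List.exists_cons_of_ne_nil hne2
      have hjoin : PySem.Chars.join ", ".toList (((t :: u :: v :: ws).dropLast).map bPiece)
          = bPiece t ++ ", ".toList
            ++ PySem.Chars.join ", ".toList (((u :: v :: ws).dropLast).map bPiece) := by
        have hdl : (t :: u :: v :: ws).dropLast = t :: (u :: v :: ws).dropLast := rfl
        rw [hdl, List.map_cons, hps, PySem.Chars.join_cons_cons, ← hps]
      have hlast : (t :: u :: v :: ws).getLast (by simp) = (u :: v :: ws).getLast (by simp) := by
        simp [List.getLast_cons]
      refine Prod.ext ?_ ?_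
      · show bPiece t ++ ", ".toList ++ _ = _
        rw [hjoin, hlast]
        simp [List.append_assoc]
      · show cost_per_scoop * t.2 + _ = _
        simp [List.map_cons, List.sum_cons]

theorem B_else (xs : List (String × Int)) (hne : xs ≠ []) (h2 : 2 ≤ xs.length) :
    get_complete_order_and_cost_alt xs =
      (String.mk (PySem.Chars.join ", ".toList (xs.dropLast.map bPiece)
          ++ " and ".toList ++ bPiece (xs.getLast hne)),
       (xs.map (fun t => cost_per_scoop * t.2)).sum) := by
  cases xs with
  | nil => exact absurd rfl hne
  | cons t rest =>
    have hrne : rest ≠ [] := by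
      intro hc; rw [hc] at h2; simp at h2
    show (String.mk (bRec t rest).1, (bRec t rest).2) = _
    rw [bRec_eq rest t hrne]

-- ===== VERDICT (by name: the statement is the Claim_ definition above) =====
theorem get_complete_order_and_cost_spec : Claim_equal_get_complete_order_and_cost := by
  intro xs _ hpre
  unfold Spec_get_complete_order_and_cost
  unfold Pre_get_complete_order_and_cost at hpre
  by_cases h1 : xs.length = 1
  · match xs, h1 with
    | [t], _ =>
      by_cases ht : t.2 = 1 <;>
        simp [get_complete_order_and_cost, get_complete_order_and_cost_alt, bRec, bPiece, ht,
          cost_per_scoop, PySem.List.pyGetD, PySem.List.pyGet?, PySem.List.pyIdx?]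
  · have h2 : 2 ≤ xs.length := by
      have : xs.length ≠ 0 := by simpa using hpre
      omega
    rw [A_else xs hpre h2, B_else xs hpre h2]
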